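-- pv_equiv track=rewrite | github.com/ostroumova-la/cascade_communities | stub_alg1.3.py | ce__renumber
-- ===== SOURCE A (Python) =====
-- def ce__renumber(dictionary):
--     count = 0
--     ret = dictionary.copy()
--     new_values = dict([])
--     for key in dictionary.keys():
--         value = dictionary[key]
--         new_value = new_values.get(value, -1)
--         if new_value == -1:
--             new_values[value] = count
--             new_value = count
--             count += 1
--         ret[key] = new_value
--     return ret
-- ===== SOURCE B (Python) =====
-- def ce__renumber(dictionary):
--     values = list(dictionary.values())
--     return {k: len(set(values[:values.index(v)])) for k, v in dictionary.items()}
-- ===== Notes on version B (the rewrite author's own statement) =====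
-- stated objective: simpler
-- what changed: Removes A's mutable counter/table loop entirely: each key's new value is computed independently, in one comprehension, as the number of distinct values strictly before that value's first occurrence (len(set(values[:values.index(v)]))).
import Mathlib
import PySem

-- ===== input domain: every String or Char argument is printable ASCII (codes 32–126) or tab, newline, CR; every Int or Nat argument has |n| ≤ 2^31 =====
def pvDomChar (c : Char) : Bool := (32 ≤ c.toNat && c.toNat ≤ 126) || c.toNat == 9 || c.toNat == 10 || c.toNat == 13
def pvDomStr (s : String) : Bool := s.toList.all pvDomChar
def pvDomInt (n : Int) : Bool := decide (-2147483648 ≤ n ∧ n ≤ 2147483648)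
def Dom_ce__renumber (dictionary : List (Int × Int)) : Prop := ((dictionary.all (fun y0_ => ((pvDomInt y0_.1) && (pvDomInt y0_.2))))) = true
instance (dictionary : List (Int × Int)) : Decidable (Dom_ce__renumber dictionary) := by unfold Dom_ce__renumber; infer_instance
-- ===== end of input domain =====

-- B drops A's incremental table/counter loop entirely: each key's new value is computed
-- independently as the number of distinct values strictly before that value's first occurrence
-- (objective: simpler — one comprehension, no mutable state; not faster).

-- ===== PORT A =====
-- loop body of A: state = (count, ret, new_values); 'dictionary[key]' is getD (key comes from d.keys,
-- so the lookup never raises and the default 0 is never used — exact)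
def ceStep (d : PySem.Dict Int Int) (st : Int × PySem.Dict Int Int × PySem.Dict Int Int)
    (key : Int) : Int × PySem.Dict Int Int × PySem.Dict Int Int :=
  let value := d.getD key 0
  let new_value := (st.2.2).getD value (-1)
  if new_value == -1 then (st.1 + 1, st.2.1.insert key st.1, st.2.2.insert value st.1)
  else (st.1, st.2.1.insert key new_value, st.2.2)

def ce__renumber (dictionary : List (Int × Int)) : List (Int × Int) :=
  let d := PySem.Dict.ofList dictionary
  ((d.keys).foldl (ceStep d) (0, d, PySem.Dict.empty)).2.1.items

-- ===== PORT B =====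
-- values = list(dictionary.values());
-- {k: len(set(values[:values.index(v)])) for k, v in dictionary.items()}
-- ('values.index(v)' never raises since v is drawn from values; the .getD 0 default is never used)
def ce__renumber_alt (dictionary : List (Int × Int)) : List (Int × Int) :=
  let d := PySem.Dict.ofList dictionary
  let values := d.values
  (d.items.foldl (fun r p =>
      r.insert p.1
        ((PySem.Set.ofList (PySem.List.slice values none
            (some (((PySem.List.index? values p.2).getD 0 : Nat) : Int)))).length : Int))
    PySem.Dict.empty).items

-- ===== PRECONDITION & SPEC =====
def Spec_ce__renumber (dictionary : List (Int × Int)) (out : List (Int × Int)) : Prop := out = ce__renumber_alt dictionary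
instance (dictionary : List (Int × Int)) (out : List (Int × Int)) : Decidable (Spec_ce__renumber dictionary out) := by unfold Spec_ce__renumber; infer_instance

-- ===== CLAIM (what is proved, stated in full; the proofs are below) =====
def Claim_equal_ce__renumber : Prop := ∀ (dictionary : List (Int × Int)), Dom_ce__renumber dictionary → Spec_ce__renumber dictionary (ce__renumber dictionary)

-- ===== LEMMAS AND PROOFS =====

-- first-occurrence index table of a value list (what A's new_values dict holds after the loop)
def ceTbl (V : List Int) : PySem.Dict Int Int :=
  (PySem.List.enumerate (PySem.List.dedup V)).foldl (fun m p => m.insert p.2 p.1) PySem.Dict.empty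

theorem ceTbl_items (V : List Int) :
    (ceTbl V).items = (PySem.List.enumerate (PySem.List.dedup V)).map (fun p => (p.2, p.1)) := by
  unfold ceTbl
  have h := PySem.Dict.items_foldl_insert_fresh
    (PySem.List.enumerate (PySem.List.dedup V)) (fun p => p.2) (fun p => p.1)
    PySem.Dict.empty (fun a _ => PySem.Dict.contains_empty _)
    (by rw [PySem.List.map_snd_enumerate]; exact PySem.List.nodup_dedup V)
  simpa using h

theorem ceTbl_keys (V : List Int) : (ceTbl V).keys = PySem.List.dedup V := by
  show ((ceTbl V).items).map (·.1) = _
  rw [ceTbl_items, List.map_map]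
  exact PySem.List.map_snd_enumerate (PySem.List.dedup V) 0

theorem ceTbl_nodup_keys (V : List Int) : (ceTbl V).keys.Nodup := by
  rw [ceTbl_keys]; exact PySem.List.nodup_dedup V

theorem ceTbl_get? (V : List Int) (v : Int) :
    (ceTbl V).get? v = (PySem.List.index? (PySem.List.dedup V) v).map (fun n : Nat => (n : Int)) := by
  cases hidx : PySem.List.index? (PySem.List.dedup V) v with
  | none =>
      have hv : v ∉ PySem.List.dedup V := (PySem.List.index?_eq_none_iff _ _).mp hidx
      rw [Option.map_none, PySem.Dict.get?_eq_none_iff_not_mem_keys, ceTbl_keys]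
      exact hv
  | some k =>
      obtain ⟨hk, hget, -⟩ := PySem.List.getElem_of_index?_eq_some hidx
      have hmem : (v, (k : Int)) ∈ (ceTbl V).items := by
        rw [ceTbl_items]
        refine List.mem_map.mpr ⟨((k : Int), v), ?_, rfl⟩
        rw [PySem.List.mem_enumerate_iff]
        refine ⟨k, hk, ?_⟩
        rw [hget]
        norm_num
      rw [PySem.Dict.get?_of_mem_items _ hmem (ceTbl_nodup_keys V)]
      rfl

-- dedup through an appended tail / element
theorem dedup_append (s t : List Int) :
    PySem.List.dedup (s ++ t) =
      PySem.List.dedup s ++ (PySem.Set.ofList t).filter (fun y => !(PySem.Set.contains (PySem.List.dedup s) y)) := by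
  simp only [PySem.List.dedup_eq_ofList]
  rw [PySem.Set.ofList_append, PySem.Set.update_eq_append_filter]

theorem dedup_snoc (s : List Int) (v : Int) :
    PySem.List.dedup (s ++ [v]) = PySem.Set.add (PySem.List.dedup s) v := by
  simp only [PySem.List.dedup_eq_ofList]
  exact PySem.Set.ofList_append_singleton s v

theorem mem_dedup_of_mem (s : List Int) (v : Int) (h : v ∈ s) : v ∈ PySem.List.dedup s :=
  (PySem.List.mem_dedup _ _).mpr h

theorem not_mem_dedup_of_not_mem (s : List Int) (v : Int) (h : v ∉ s) : v ∉ PySem.List.dedup s :=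
  fun hv => h ((PySem.List.mem_dedup _ _).mp hv)

theorem dedup_snoc_mem (s : List Int) (v : Int) (h : v ∈ s) :
    PySem.List.dedup (s ++ [v]) = PySem.List.dedup s := by
  rw [dedup_snoc, PySem.Set.add_of_mem (mem_dedup_of_mem s v h)]

theorem dedup_snoc_not_mem (s : List Int) (v : Int) (h : v ∉ s) :
    PySem.List.dedup (s ++ [v]) = PySem.List.dedup s ++ [v] := by
  rw [dedup_snoc, PySem.Set.add_of_not_mem (not_mem_dedup_of_not_mem s v h)]

-- stability: the table of a prefix agrees, on values of the prefix, with the full table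
theorem ceTbl_get?_prefix (s t : List Int) (v : Int) (h : v ∈ s) :
    (ceTbl (s ++ t)).get? v = (ceTbl s).get? v := by
  rw [ceTbl_get?, ceTbl_get?, dedup_append,
    PySem.List.index?_append_of_mem _ (mem_dedup_of_mem s v h)]

theorem ceTbl_snoc_not_mem (s : List Int) (v : Int) (h : v ∉ s) :
    ceTbl (s ++ [v]) = (ceTbl s).insert v ((PySem.List.dedup s).length : Int) := by
  apply PySem.Dict.ext
  have hnc : (ceTbl s).contains v = false := by
    rw [PySem.Dict.contains_eq_decide_mem_keys, ceTbl_keys]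
    simpa using h
  rw [PySem.Dict.items_insert_of_not_contains _ _ hnc, ceTbl_items, ceTbl_items,
    dedup_snoc_not_mem s v h, PySem.List.enumerate_append, List.map_append]
  simp [PySem.List.enumerate]

theorem ceTbl_getD_not_mem (s : List Int) (v : Int) (h : v ∉ s) :
    (ceTbl s).getD v (-1) = -1 := by
  rw [PySem.Dict.getD_eq_get?_getD, ceTbl_get?,
    (PySem.List.index?_eq_none_iff _ _).mpr (not_mem_dedup_of_not_mem s v h)]
  rfl

-- on a seen value the sentinel lookup returns the (nonnegative) final index
theorem ceTbl_getD_mem (s t : List Int) (v : Int) (h : v ∈ s) :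
    ∃ k : Nat, (ceTbl s).getD v (-1) = (k : Int) ∧ (ceTbl (s ++ t)).getD v 0 = (k : Int) := by
  obtain ⟨k, hk⟩ := Option.isSome_iff_exists.mp
    ((PySem.List.index?_isSome_iff _ _).mpr (mem_dedup_of_mem s v h))
  refine ⟨k, ?_, ?_⟩
  · rw [PySem.Dict.getD_eq_get?_getD, ceTbl_get?, hk]; rfl
  · rw [PySem.Dict.getD_eq_get?_getD, ceTbl_get?_prefix s t v h, ceTbl_get?, hk]; rfl

-- index of a fresh value: it sits right after dedup s in the full list
theorem ceTbl_getD_new (s t : List Int) (v : Int) (h : v ∉ s) :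
    (ceTbl (s ++ [v] ++ t)).getD v 0 = ((PySem.List.dedup s).length : Int) := by
  have hidx : PySem.List.index? (PySem.List.dedup (s ++ [v])) v
      = some (PySem.List.dedup s).length := by
    rw [dedup_snoc_not_mem s v h]
    exact PySem.List.index?_append_singleton_self _ v (not_mem_dedup_of_not_mem s v h)
  rw [PySem.Dict.getD_eq_get?_getD, ceTbl_get?_prefix (s ++ [v]) t v (by simp),
    ceTbl_get?, hidx]
  rfl

-- the loop invariant for A's fold: seen values s, remaining keys ks
theorem ceLoop (d : PySem.Dict Int Int) (V : List Int) :
    ∀ (ks : List Int) (s : List Int) (r : PySem.Dict Int Int),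
      V = s ++ ks.map (fun k => d.getD k 0) →
      ks.foldl (ceStep d) (((PySem.List.dedup s).length : Int), r, ceTbl s)
        = (((PySem.List.dedup V).length : Int),
           ks.foldl (fun r k => r.insert k ((ceTbl V).getD (d.getD k 0) 0)) r,
           ceTbl V) := by
  intro ks
  induction ks with
  | nil =>
      intro s r h
      simp only [List.map_nil, List.append_nil] at h
      subst h
      rfl
  | cons k ks ih =>
      intro s r h
      rw [List.map_cons] at h
      simp only [List.foldl_cons]
      by_cases hmem : d.getD k 0 ∈ s
      · obtain ⟨j, hj1, hj2⟩ :=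
          ceTbl_getD_mem s (d.getD k 0 :: ks.map (fun k => d.getD k 0)) (d.getD k 0) hmem
        rw [List.append_cons, ← List.append_cons, ← h] at hj2
        have hstep : ceStep d (((PySem.List.dedup s).length : Int), r, ceTbl s) k
            = (((PySem.List.dedup s).length : Int), r.insert k ((j : Int)), ceTbl s) := by
          unfold ceStep
          simp only [hj1]
          rw [if_neg (by simp)]
        rw [hstep, hj2]
        have htbl : ceTbl (s ++ [d.getD k 0]) = ceTbl s := by
          unfold ceTbl; rw [dedup_snoc_mem _ _ hmem]
        have hlen : PySem.List.dedup (s ++ [d.getD k 0]) = PySem.List.dedup s :=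
          dedup_snoc_mem _ _ hmem
        have hIH := ih (s ++ [d.getD k 0]) (r.insert k ((j : Int)))
          (by rw [h, List.append_cons])
        rw [htbl, hlen] at hIH
        exact hIH
      · have hV' : V = (s ++ [d.getD k 0]) ++ ks.map (fun k => d.getD k 0) := by
          rw [h, List.append_cons]
        have hval : (ceTbl V).getD (d.getD k 0) 0 = ((PySem.List.dedup s).length : Int) := by
          rw [hV']
          exact ceTbl_getD_new s _ _ hmem
        have hstep : ceStep d (((PySem.List.dedup s).length : Int), r, ceTbl s) k
            = (((PySem.List.dedup (s ++ [d.getD k 0])).length : Int),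
               r.insert k ((PySem.List.dedup s).length : Int),
               ceTbl (s ++ [d.getD k 0])) := by
          unfold ceStep
          simp only [ceTbl_getD_not_mem s _ hmem]
          rw [if_pos (by simp), ceTbl_snoc_not_mem s _ hmem, dedup_snoc_not_mem s _ hmem]
          simp only [List.length_append, List.length_singleton]
          push_cast
          rfl
        rw [hstep, hval]
        exact ih (s ++ [d.getD k 0]) (r.insert k ((PySem.List.dedup s).length : Int)) hV'

-- folding key-wise inserts: untouched keys keep their value, touched keys get g k
theorem getD_foldl_insert_not_mem (l : List Int) (g : Int → Int) (k : Int) :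
    ∀ r : PySem.Dict Int Int, k ∉ l →
      (l.foldl (fun r x => r.insert x (g x)) r).getD k 0 = r.getD k 0 := by
  induction l with
  | nil => intro r _; rfl
  | cons x l ih =>
      intro r h
      have hne : k ≠ x := fun he => h (by rw [he]; exact List.mem_cons_self ..)
      simp only [List.foldl_cons]
      rw [ih _ (fun hm => h (List.mem_cons_of_mem _ hm)),
        PySem.Dict.getD_insert_of_ne _ _ _ hne]

theorem getD_foldl_insert_mem (l : List Int) (g : Int → Int) (k : Int) :
    ∀ r : PySem.Dict Int Int, k ∈ l → l.Nodup →
      (l.foldl (fun r x => r.insert x (g x)) r).getD k 0 = g k := by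
  induction l with
  | nil => intro r h _; cases h
  | cons x l ih =>
      intro r h hnd
      simp only [List.foldl_cons]
      rcases List.mem_cons.mp h with he | hm
      · subst he
        rw [getD_foldl_insert_not_mem l g k _ (List.nodup_cons.mp hnd).1,
          PySem.Dict.getD_insert_self]
      · exact ih _ hm (List.nodup_cons.mp hnd).2

theorem keys_foldl_insert_self (l : List Int) (g : Int → Int) (r : PySem.Dict Int Int)
    (h : ∀ x ∈ l, x ∈ r.keys) :
    (l.foldl (fun r x => r.insert x (g x)) r).keys = r.keys := by
  rw [PySem.Dict.keys_foldl_insert l (fun _ x => g x) r, PySem.Set.update_eq_append_filter]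
  have hf : ((PySem.Set.ofList l).filter (fun y => !(PySem.Set.contains r.keys y))) = [] := by
    apply List.filter_eq_nil_iff.mpr
    intro y hy
    have hmem : y ∈ r.keys := h y ((PySem.Set.mem_ofList _ _).mp hy)
    simpa using hmem
  rw [hf, List.append_nil]

-- Set.ofList of a cons starts with its head
theorem foldl_add_prefix (l : List Int) :
    ∀ s : List Int, s <+: l.foldl PySem.Set.add s := by
  induction l with
  | nil => intro s; exact List.prefix_refl s
  | cons x l ih =>
      intro s
      refine List.IsPrefix.trans ?_ (ih (PySem.Set.add s x))
      unfold PySem.Set.add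
      split
      · exact List.prefix_refl s
      · exact ⟨[x], rfl⟩

theorem ofList_cons_head (v : Int) (suf : List Int) :
    ∃ t, PySem.Set.ofList (v :: suf) = v :: t := by
  have h1 : PySem.Set.ofList (v :: suf) = suf.foldl PySem.Set.add [v] := by
    rw [PySem.Set.ofList_eq_foldl, List.foldl_cons]
    rfl
  obtain ⟨t, ht⟩ := foldl_add_prefix suf [v]
  exact ⟨t, by rw [h1, ← ht]; rfl⟩

-- KEY LEMMA linking the two programs: A's table value on v ∈ V equals B's
-- closed-form count |set(V[:V.index(v)])|.
theorem ceTbl_getD_eq_prefix_card (V : List Int) (v : Int) (h : v ∈ V) :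
    (ceTbl V).getD v 0
      = ((PySem.Set.ofList (V.take ((PySem.List.index? V v).getD 0))).length : Int) := by
  obtain ⟨i, hi⟩ := Option.isSome_iff_exists.mp ((PySem.List.index?_isSome_iff V v).mpr h)
  obtain ⟨pre, suf, hV, hlen, hpre⟩ := (PySem.List.index?_eq_some_iff V v i).mp hi
  rw [hi]
  simp only [Option.getD_some]
  have htake : V.take i = pre := by
    rw [hV, ← hlen, List.take_left]
  rw [htake]
  have hnm : v ∉ PySem.List.dedup pre := not_mem_dedup_of_not_mem pre v hpre
  obtain ⟨t, ht⟩ := ofList_cons_head v suf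
  have hrest : PySem.List.dedup V
      = PySem.List.dedup pre ++ v :: (t.filter (fun y => !(PySem.Set.contains (PySem.List.dedup pre) y))) := by
    rw [hV, dedup_append, ht]
    simp [hpre]
  have hidx : PySem.List.index? (PySem.List.dedup V) v
      = some (PySem.List.dedup pre).length := by
    rw [hrest]
    exact (PySem.List.index?_eq_some_iff _ _ _).mpr ⟨_, _, rfl, rfl, hnm⟩
  rw [PySem.Dict.getD_eq_get?_getD, ceTbl_get?, hidx]
  simp [PySem.List.dedup_eq_ofList]

-- ===== VERDICT (by name: the statement is the Claim_ definition above) =====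
theorem ce__renumber_spec : Claim_equal_ce__renumber := by
  intro dictionary _
  unfold Spec_ce__renumber ce__renumber ce__renumber_alt
  set d := PySem.Dict.ofList dictionary with hd
  have hnd : d.keys.Nodup := PySem.Dict.nodup_keys_ofList dictionary
  have hvals : d.values = d.keys.map (fun k => d.getD k 0) :=
    PySem.Dict.values_eq_map_keys d hnd 0
  set V := d.values with hV
  set g : Int → Int := fun v =>
    ((PySem.Set.ofList (PySem.List.slice V none
        (some (((PySem.List.index? V v).getD 0 : Nat) : Int)))).length : Int) with hg
  show (d.keys.foldl (ceStep d) (0, d, PySem.Dict.empty)).2.1.items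
    = (d.items.foldl (fun r p => r.insert p.1 (g p.2)) PySem.Dict.empty).items
  have h00 : ((0 : Int), d, (PySem.Dict.empty : PySem.Dict Int Int))
      = (((PySem.List.dedup ([] : List Int)).length : Int), d, ceTbl []) := rfl
  have hrun := ceLoop d V d.keys [] d (by simpa using hvals)
  rw [h00, hrun]
  set retA := d.keys.foldl (fun r k => r.insert k ((ceTbl V).getD (d.getD k 0) 0)) d with hret
  have hkeys : retA.keys = d.keys :=
    keys_foldl_insert_self d.keys _ d (fun x hx => hx)
  have hretItems : retA.items = d.keys.map (fun k => (k, (ceTbl V).getD (d.getD k 0) 0)) := by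
    rw [PySem.Dict.items_eq_map_keys retA (hkeys ▸ hnd) 0, hkeys]
    apply List.map_congr_left
    intro k hk
    rw [hret, getD_foldl_insert_mem d.keys _ k d hk hnd]
  have hBItems : (d.items.foldl (fun r p => r.insert p.1 (g p.2)) PySem.Dict.empty).items
      = d.items.map (fun p => (p.1, g p.2)) := by
    rw [PySem.Dict.items_foldl_insert_fresh d.items (fun p => p.1) (fun p => g p.2)
      _ (fun a _ => PySem.Dict.contains_empty _) hnd]
    rfl
  rw [hretItems, hBItems, PySem.Dict.items_eq_map_keys d hnd 0, List.map_map]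
  apply List.map_congr_left
  intro k hk
  have hvmem : d.getD k 0 ∈ V := by
    show d.getD k 0 ∈ V
    rw [hvals]
    exact List.mem_map.mpr ⟨k, hk, rfl⟩
  show (k, (ceTbl V).getD (d.getD k 0) 0)
      = (k, ((PySem.Set.ofList (PySem.List.slice V none
          (some (((PySem.List.index? V (d.getD k 0)).getD 0 : Nat) : Int)))).length : Int))
  rw [PySem.List.slice_to_natCast]
  exact congrArg (Prod.mk k) (ceTbl_getD_eq_prefix_card V (d.getD k 0) hvmem)
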